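-- pv_equiv track=rewrite | github.com/pashkov-ai/Prep | LeetCode/weekly/wc488_q1.py | dominantIndices
-- ===== SOURCE A (Python) =====
-- def dominantIndices(nums: list[int]) -> int:
--     n = len(nums)
--     counter = 0
--     prefix_sum = nums[n-1]
--     average_elems = 1
--     for i in reversed(range(n-1)):
--         if nums[i] * average_elems > prefix_sum:
--             counter += 1
--         average_elems += 1
--         prefix_sum += nums[i]
--     return counter
-- ===== SOURCE B (Python) =====
-- def dominantIndices(nums: list[int]) -> int:
--     n = len(nums)
--     suf = [0] * (n + 1)
--     for i in range(n - 1, -1, -1):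
--         suf[i] = nums[i] + suf[i + 1]
--     return sum(1 for i in range(n - 1) if nums[i] * (n - 1 - i) > suf[i + 1])
-- ===== Notes on version B (the rewrite author's own statement) =====
-- stated objective: alternative
-- what changed: Replaces A's single right-to-left scan carrying (counter, running prefix sum, element count) state with an explicit suffix-sum array built first, then a separate stateless forward counting pass comparing nums[i]*(n-1-i) > suf[i+1].
import Mathlib
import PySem

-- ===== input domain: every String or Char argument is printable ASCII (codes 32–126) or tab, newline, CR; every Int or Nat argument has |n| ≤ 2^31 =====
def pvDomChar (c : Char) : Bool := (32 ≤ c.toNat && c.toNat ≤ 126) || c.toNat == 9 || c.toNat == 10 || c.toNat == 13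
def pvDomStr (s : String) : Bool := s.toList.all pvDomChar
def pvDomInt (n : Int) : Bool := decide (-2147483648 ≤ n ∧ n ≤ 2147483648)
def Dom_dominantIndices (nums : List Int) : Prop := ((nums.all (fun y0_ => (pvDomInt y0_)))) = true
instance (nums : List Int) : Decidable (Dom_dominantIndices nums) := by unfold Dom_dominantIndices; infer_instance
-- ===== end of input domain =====

-- B builds an explicit suffix-sum array and counts in a separate stateless forward pass,
-- instead of A's single backward scan carrying (counter, prefix_sum, average_elems) state.

-- ===== PORT A =====
-- A's loop step: conditionally bump counter, always extend prefix_sum and average_elems.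
def stepA (nums : List Int) (st : Int × Int × Int) (i : Nat) : Int × Int × Int :=
  if nums.getD i 0 * st.2.2 > st.2.1 then (st.1 + 1, st.2.1 + nums.getD i 0, st.2.2 + 1)
  else (st.1, st.2.1 + nums.getD i 0, st.2.2 + 1)

def dominantIndices (nums : List Int) : Int :=
  let n := nums.length
  match PySem.List.pyGet? nums ((n : Int) - 1) with
  | none => 0  -- unreachable under Pre_ (Python raises IndexError here)
  | some last => (((List.range (n - 1)).reverse).foldl (stepA nums) (0, last, 1)).1

-- ===== PORT B =====
-- the right-to-left fill of Source B's suffix-sum array suf (length n+1, suf[n] = 0)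
def sufSums : List Int → List Int
  | [] => [0]
  | x :: xs =>
    let s := sufSums xs
    (x + s.headD 0) :: s

def dominantIndices_alt (nums : List Int) : Int :=
  let n := nums.length
  let suf := sufSums nums
  ((List.range (n - 1)).countP
    (fun i => nums.getD i 0 * ((n : Int) - 1 - i) > suf.getD (i + 1) 0) : Nat)

-- ===== PRECONDITION & SPEC =====
-- Pre_ excludes only the empty list, on which A raises IndexError (nums[n-1]).
def Pre_dominantIndices (nums : List Int) : Prop := nums ≠ []
instance (nums : List Int) : Decidable (Pre_dominantIndices nums) := by unfold Pre_dominantIndices; infer_instance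
def pvWitness_dominantIndices : List Int := [3, 1, 2]

def Spec_dominantIndices (nums : List Int) (out : Int) : Prop := out = dominantIndices_alt nums
instance (nums : List Int) (out : Int) : Decidable (Spec_dominantIndices nums out) := by unfold Spec_dominantIndices; infer_instance

-- ===== CLAIM (what is proved, stated in full; the proofs are below) =====
def Claim_equal_dominantIndices : Prop := ∀ (nums : List Int), Dom_dominantIndices nums → Pre_dominantIndices nums → Spec_dominantIndices nums (dominantIndices nums)

-- ===== LEMMAS AND PROOFS =====

-- the shared counting predicate both programs compute
def pvP (nums : List Int) (i : Nat) : Bool :=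
  decide (nums.getD i 0 * ((nums.length : Int) - 1 - i) > (nums.drop (i + 1)).sum)

-- A's backward loop, recast as structural recursion on the number of remaining indices
def auxA (nums : List Int) : Nat → (Int × Int × Int) → (Int × Int × Int)
  | 0, st => st
  | m + 1, st => auxA nums m (stepA nums st m)

theorem foldl_eq_auxA (nums : List Int) : ∀ (m : Nat) (st : Int × Int × Int),
    ((List.range m).reverse).foldl (stepA nums) st = auxA nums m st := by
  intro m
  induction m with
  | zero => intro st; simp [auxA]
  | succ m ih =>
    intro st
    rw [List.range_succ]
    simp only [List.reverse_append, List.reverse_singleton, List.singleton_append,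
      List.foldl_cons]
    exact ih _

theorem dropSum_step (nums : List Int) (m : Nat) (h : m < nums.length) :
    (nums.drop m).sum = nums.getD m 0 + (nums.drop (m + 1)).sum := by
  rw [List.drop_eq_getElem_cons h, List.sum_cons, List.getD_eq_getElem nums 0 h]

theorem auxA_inv (nums : List Int) : ∀ (m : Nat), m < nums.length → ∀ (c : Int),
    (auxA nums m (c, (nums.drop m).sum, (nums.length : Int) - m)).1 =
      c + ((List.range m).countP (pvP nums) : Int) := by
  intro m
  induction m with
  | zero => intro _ c; simp [auxA]
  | succ m ih =>
    intro hm c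
    have hm' : m < nums.length := Nat.lt_of_succ_lt hm
    have hsum := dropSum_step nums m hm'
    have hae : (nums.length : Int) - (m + 1 : Nat) + 1 = (nums.length : Int) - m := by
      push_cast; ring
    have harg : ((nums.length : Int) - 1 - (m : Int)) = ((nums.length : Int) - ((m + 1 : Nat) : Int)) := by
      push_cast; ring
    have hP : pvP nums m =
        decide (nums.getD m 0 * ((nums.length : Int) - (m + 1 : Nat)) > (nums.drop (m + 1)).sum) := by
      unfold pvP; rw [harg]
    have hstate : (nums.drop (m + 1)).sum + nums.getD m 0 = (nums.drop m).sum := by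
      rw [hsum]; ring
    rw [List.range_succ, List.countP_append, List.countP_singleton]
    simp only [auxA, stepA]
    by_cases hc : nums.getD m 0 * ((nums.length : Int) - (m + 1 : Nat)) > (nums.drop (m + 1)).sum
    · have hPt : pvP nums m = true := by rw [hP]; exact decide_eq_true hc
      rw [if_pos hc, hstate, hae, ih hm', hPt]
      simp only [if_true]
      push_cast; ring
    · have hPf : pvP nums m = false := by rw [hP]; simpa using hc
      rw [if_neg hc, hstate, hae, ih hm', hPf]
      simp only [Bool.false_eq_true, if_false]
      push_cast; ring

theorem sufSums_getD (nums : List Int) : ∀ (i : Nat),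
    (sufSums nums).getD i 0 = (nums.drop i).sum := by
  induction nums with
  | nil => intro i; cases i <;> simp [sufSums]
  | cons x xs ih =>
    intro i
    cases i with
    | zero =>
      have h0 := ih 0
      cases h : sufSums xs with
      | nil => exfalso; cases xs <;> simp [sufSums] at h
      | cons a l =>
        have ha : a = xs.sum := by simpa [h] using h0
        simp [sufSums, h, ha]
    | succ j => simpa [sufSums] using ih j

theorem alt_eq_count (nums : List Int) :
    dominantIndices_alt nums = ((List.range (nums.length - 1)).countP (pvP nums) : Int) := by
  show ((List.range (nums.length - 1)).countP
    (fun i => nums.getD i 0 * ((nums.length : Int) - 1 - i) > (sufSums nums).getD (i + 1) 0) : Nat)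
      = ((List.range (nums.length - 1)).countP (pvP nums) : Int)
  have hfun : (fun i => decide (nums.getD i 0 * ((nums.length : Int) - 1 - i) > (sufSums nums).getD (i + 1) 0)) = pvP nums := by
    funext i
    unfold pvP
    rw [sufSums_getD]
  rw [hfun]

-- ===== VERDICT (by name: the statement is the Claim_ definition above) =====
theorem dominantIndices_spec : Claim_equal_dominantIndices := by
  intro nums _ hpre
  unfold Spec_dominantIndices dominantIndices
  have hn : 0 < nums.length := List.length_pos_of_ne_nil hpre
  have hcast : (nums.length : Int) - 1 = ((nums.length - 1 : Nat) : Int) := by omega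
  have hlt : nums.length - 1 < nums.length := by omega
  have hget : PySem.List.pyGet? nums ((nums.length : Int) - 1) = some (nums.getD (nums.length - 1) 0) := by
    rw [hcast, PySem.List.pyGet?_natCast, List.getD_eq_getElem nums 0 hlt,
      List.getElem?_eq_getElem hlt]
  simp only [hget]
  rw [foldl_eq_auxA]
  have hdrop : (nums.drop (nums.length - 1)).sum = nums.getD (nums.length - 1) 0 := by
    rw [dropSum_step nums (nums.length - 1) hlt]
    have : nums.length - 1 + 1 = nums.length := by omega
    rw [this]; simp
  have hone : (nums.length : Int) - (nums.length - 1 : Nat) = 1 := by omega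
  rw [← hdrop, ← hone, auxA_inv nums (nums.length - 1) hlt 0, alt_eq_count]
  ring
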